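-- pv_equiv track=rewrite | github.com/flyaway1217/CS-6390-Information-Extraction | program #2 (DIRT)/source/program2/utils.py | _extract
-- ===== SOURCE A (Python) =====
-- def _extract(words, poss):
--     """Extract the raw triples from the given sentence.
--
--     Args:
--         words: list(str) - A list of phrases
--         poss: list(str) - A list of pos tags.
--
--     Returns:
--         list(list(str))
--     """
--     assert len(words) == len(poss)
--     reval = []
--     try:
--         i = poss.index('np')
--     except ValueError:
--         return reval
--
--     while True:
--         try:
--             j = poss.index('np', i+1)
--         except ValueError:
--             break
--         if j > i+1:
--             reval.append(words[i:j+1])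
--         i = j
--     return reval
-- ===== SOURCE B (Python) =====
-- def _extract(words, poss):
--     assert len(words) == len(poss)
--     reval = []
--     buf = None  # words since (and including) the last 'np' seen, or None before any 'np'
--     for w, p in zip(words, poss):
--         if p == 'np':
--             if buf is not None and len(buf) > 1:
--                 reval.append(buf + [w])
--             buf = [w]
--         elif buf is not None:
--             buf.append(w)
--     return reval
-- ===== Notes on version B (the rewrite author's own statement) =====
-- stated objective: alternative
-- what changed: A scans for 'np' positions with repeated exception-driven list.index calls and slices words between them; B is a single streaming pass over zip(words, poss) that grows each segment incrementally in a buffer, emitting it when the next 'np' arrives, with no position indices and no slicing.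
import Mathlib
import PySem

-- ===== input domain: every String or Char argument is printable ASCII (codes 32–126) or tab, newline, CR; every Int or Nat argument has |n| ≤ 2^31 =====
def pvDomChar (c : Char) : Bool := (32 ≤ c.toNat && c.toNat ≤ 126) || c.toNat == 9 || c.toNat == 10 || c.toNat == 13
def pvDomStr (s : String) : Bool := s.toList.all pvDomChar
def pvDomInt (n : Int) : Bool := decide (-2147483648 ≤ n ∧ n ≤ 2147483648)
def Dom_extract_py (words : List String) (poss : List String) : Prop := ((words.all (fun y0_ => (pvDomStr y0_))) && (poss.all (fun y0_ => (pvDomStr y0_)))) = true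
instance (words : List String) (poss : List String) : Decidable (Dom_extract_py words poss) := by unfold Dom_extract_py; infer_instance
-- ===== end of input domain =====

-- B replaces A's exception-driven while-loop of repeated list.index scans and list slicing
-- with one streaming pass over zip(words, poss) that builds each segment incrementally in a
-- buffer (objective: alternative algorithm/data structure, same asymptotic cost).

-- ===== PORT A =====
-- poss.index('np', s) : found index is relative to the dropped prefix, so add s back (exact for a Nat start s)
def pyIndexFrom (xs : List String) (v : String) (s : Nat) : Option Nat :=
  (PySem.List.index? (xs.drop s) v).map (· + s)

-- needed by the port's termination proof
theorem pyIndexFrom_bounds {xs : List String} {v : String} {s j : Nat}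
    (h : pyIndexFrom xs v s = some j) : s ≤ j ∧ j < xs.length := by
  unfold pyIndexFrom at h
  obtain ⟨k, hk, hj⟩ := Option.map_eq_some_iff.mp h
  obtain ⟨hlt, -, -⟩ := PySem.List.getElem_of_index?_eq_some hk
  have hlen : (xs.drop s).length = xs.length - s := List.length_drop
  omega

-- the 'while True' loop of A: i is the previous 'np' index
def extractLoop (words poss : List String) (i : Nat) (acc : List (List String)) : List (List String) :=
  match h : pyIndexFrom poss "np" (i + 1) with
  | none => acc
  | some j =>
      extractLoop words poss j
        (if i + 1 < j then acc ++ [PySem.List.slice words (some (i : Int)) (some ((j : Int) + 1))] else acc)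
termination_by poss.length - i
decreasing_by have := pyIndexFrom_bounds h; omega

def extract_py (words : List String) (poss : List String) : List (List String) :=
  match PySem.List.index? poss "np" with
  | none => []
  | some i => extractLoop words poss i []

-- ===== PORT B =====
-- the for-loop of Source B: buf is None before the first 'np', afterwards the words since
-- (and including) the last 'np'; reval is the accumulator
def extractAltLoop : List (String × String) → Option (List String) → List (List String) → List (List String)
  | [], _, acc => acc
  | (w, p) :: rest, buf, acc =>
    if p = "np" then
      extractAltLoop rest (some [w])
        (match buf with
         | some b => if 1 < b.length then acc ++ [b ++ [w]] else acc
         | none => acc)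
    else
      match buf with
      | some b => extractAltLoop rest (some (b ++ [w])) acc
      | none => extractAltLoop rest none acc

def extract_py_alt (words : List String) (poss : List String) : List (List String) :=
  extractAltLoop (words.zip poss) none []

-- ===== PRECONDITION & SPEC =====
-- A asserts len(words) == len(poss) (AssertionError otherwise); Pre_ admits exactly the asserted inputs.
def Pre_extract_py (words : List String) (poss : List String) : Prop := words.length = poss.length
instance (words : List String) (poss : List String) : Decidable (Pre_extract_py words poss) := by unfold Pre_extract_py; infer_instance
def pvWitness_extract_py : List String × List String := (["a", "b", "c", "d"], ["np", "x", "np", "np"])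

def Spec_extract_py (words : List String) (poss : List String) (out : List (List String)) : Prop := out = extract_py_alt words poss
instance (words : List String) (poss : List String) (out : List (List String)) : Decidable (Spec_extract_py words poss out) := by unfold Spec_extract_py; infer_instance

-- ===== CLAIM (what is proved, stated in full; the proofs are below) =====
def Claim_equal_extract_py : Prop := ∀ (words : List String) (poss : List String), Dom_extract_py words poss → Pre_extract_py words poss → Spec_extract_py words poss (extract_py words poss)

-- ===== LEMMAS AND PROOFS =====

-- common characterisation target: consecutive pairs of the 'np' index list
def pairsP (words : List String) (l : List Nat) : List (List String) :=
  (l.zip l.tail).filterMap (fun p =>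
    if p.2 > p.1 + 1 then some (PySem.List.slice words (some (p.1 : Int)) (some ((p.2 : Int) + 1))) else none)

-- the ascending list of indices k with poss[k] = "np", starting at offset n
def genIdx : List String → Nat → List Nat
  | [], _ => []
  | x :: xs, n => if x = "np" then n :: genIdx xs (n + 1) else genIdx xs (n + 1)

theorem mem_genIdx_ge {xs : List String} {n m : Nat} (h : m ∈ genIdx xs n) : n ≤ m := by
  induction xs generalizing n with
  | nil => simp [genIdx] at h
  | cons x xs ih =>
    simp only [genIdx] at h
    split at h
    · rcases List.mem_cons.mp h with h | h
      · omega
      · have := ih h; omega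
    · have := ih h; omega

theorem genIdx_sorted (xs : List String) (n : Nat) : (genIdx xs n).Pairwise (· < ·) := by
  induction xs generalizing n with
  | nil => simp [genIdx]
  | cons x xs ih =>
    simp only [genIdx]
    split
    · exact List.Pairwise.cons (fun m hm => by have := mem_genIdx_ge hm; omega) (ih (n + 1))
    · exact ih (n + 1)

theorem index?_map_add (xs : List String) (n : Nat) :
    (PySem.List.index? xs "np").map (· + n) = (genIdx xs n).head? := by
  induction xs generalizing n with
  | nil => simp [PySem.List.index?_eq_idxOf?, genIdx]
  | cons x xs ih =>
    by_cases hx : x = "np"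
    · subst hx; rw [PySem.List.index?_cons_self]; simp [genIdx]
    · rw [PySem.List.index?_cons_of_ne xs hx]
      simp only [genIdx, hx, if_false]
      rw [← ih (n + 1), Option.map_map]
      congr 1
      funext k
      simp; omega

theorem genIdx_drop (xs : List String) (n k : Nat) :
    genIdx (xs.drop k) (n + k) = (genIdx xs n).filter (fun m => n + k ≤ m) := by
  induction xs generalizing n k with
  | nil => simp [genIdx]
  | cons x xs ih =>
    cases k with
    | zero =>
      simp only [Nat.add_zero, List.drop_zero]
      symm
      rw [List.filter_eq_self]
      intro m hm
      simpa using mem_genIdx_ge hm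
    | succ k' =>
      simp only [List.drop_succ_cons, genIdx]
      have h1 : n + (k' + 1) = (n + 1) + k' := by omega
      rw [h1, ih (n + 1) k']
      split
      · rw [List.filter_cons]
        have : ¬ (n + 1 + k' ≤ n) := by omega
        simp [this]
      · rfl

-- from 'filter (p ≤ ·) l = j :: rest' on a sorted l, the next filter step drops exactly j
theorem filter_step {l : List Nat} {p j : Nat} {rest : List Nat}
    (hs : l.Pairwise (· < ·)) (h : l.filter (fun m => p ≤ m) = j :: rest) :
    l.filter (fun m => j + 1 ≤ m) = rest := by
  have hpj : p ≤ j := by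
    have : j ∈ l.filter (fun m => p ≤ m) := by rw [h]; exact List.mem_cons_self
    simpa using (List.mem_filter.mp this).2
  have hrest : ∀ a ∈ rest, j < a := by
    have hpf : (l.filter (fun m => p ≤ m)).Pairwise (· < ·) := hs.filter _
    rw [h] at hpf
    exact fun a ha => (List.pairwise_cons.mp hpf).1 a ha
  have key : l.filter (fun m => j + 1 ≤ m) = (l.filter (fun m => p ≤ m)).filter (fun m => j + 1 ≤ m) := by
    rw [List.filter_filter]
    apply List.filter_congr
    intro a _
    by_cases hja : j + 1 ≤ a
    · have : p ≤ a := by omega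
      simp [hja, this]
    · simp [hja]
  rw [key, h, List.filter_cons]
  have hjj : (decide (j + 1 ≤ j)) = false := by simp
  simp only [hjj, Bool.false_eq_true, if_false]
  rw [List.filter_eq_self]
  intro a ha
  have := hrest a ha
  simp; omega

theorem pyIndexFrom_eq (poss : List String) (s : Nat) :
    pyIndexFrom poss "np" s = ((genIdx poss 0).filter (fun m => s ≤ m)).head? := by
  unfold pyIndexFrom
  rw [index?_map_add (poss.drop s) s]
  have := genIdx_drop poss 0 s
  simp only [Nat.zero_add] at this
  rw [this]

theorem extractLoop_eq (words poss : List String) :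
    ∀ (rest : List Nat) (i : Nat) (acc : List (List String)),
      (genIdx poss 0).filter (fun m => i + 1 ≤ m) = rest →
      extractLoop words poss i acc = acc ++ pairsP words (i :: rest) := by
  intro rest
  induction rest with
  | nil =>
    intro i acc h
    rw [extractLoop]
    split
    · simp [pairsP]
    · rename_i j hj
      rw [pyIndexFrom_eq, h] at hj
      simp at hj
  | cons j rest' ih =>
    intro i acc h
    rw [extractLoop]
    split
    · rename_i hnone
      rw [pyIndexFrom_eq, h] at hnone
      simp at hnone
    rename_i j' hj'
    rw [pyIndexFrom_eq, h] at hj'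
    simp only [List.head?_cons, Option.some.injEq] at hj'
    subst hj'
    have hnext : (genIdx poss 0).filter (fun m => j + 1 ≤ m) = rest' :=
      filter_step (genIdx_sorted poss 0) h
    rw [ih j _ hnext]
    have hP : pairsP words (i :: j :: rest') =
        (if i + 1 < j then [PySem.List.slice words (some (i : Int)) (some ((j : Int) + 1))] else []) ++ pairsP words (j :: rest') := by
      simp only [pairsP, List.tail_cons, List.zip_cons_cons, List.filterMap_cons]
      by_cases hij : i + 1 < j
      · have hg : j > i + 1 := hij
        simp [hg]
      · have hg : ¬ (j > i + 1) := hij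
        simp [hg]
    rw [hP]
    by_cases hij : i + 1 < j <;> simp [hij, List.append_assoc]

theorem extract_py_char (words poss : List String) :
    extract_py words poss = pairsP words (genIdx poss 0) := by
  have hidx : PySem.List.index? poss "np" = (genIdx poss 0).head? := by
    have h := index?_map_add poss 0
    simpa using h
  cases hg : genIdx poss 0 with
  | nil =>
    rw [hg] at hidx
    have h0 : List.idxOf? "np" poss = none := by
      rw [← PySem.List.index?_eq_idxOf?, hidx]; rfl
    simp [extract_py, h0, pairsP]
  | cons a rest =>
    rw [hg] at hidx
    have hall : (genIdx poss 0).filter (fun m => 0 ≤ m) = a :: rest := by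
      rw [List.filter_eq_self.mpr (by intro b _; simp)]; exact hg
    have hrest := filter_step (genIdx_sorted poss 0) hall
    simp only [extract_py]
    rw [hidx]
    simp only [List.head?_cons]
    rw [extractLoop_eq words poss rest a [] hrest]
    simp

-- ===== B side: the streaming loop computes the same pairs =====

-- loop with accumulator = acc ++ loop starting from empty accumulator
def segB : List (String × String) → List String → List (List String)
  | [], _ => []
  | (w, p) :: rest, b =>
    if p = "np" then (if 1 < b.length then [b ++ [w]] else []) ++ segB rest [w]
    else segB rest (b ++ [w])

def segN : List (String × String) → List (List String)
  | [] => []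
  | (w, p) :: rest => if p = "np" then segB rest [w] else segN rest

theorem extractAltLoop_some (xs : List (String × String)) :
    ∀ (b : List String) (acc : List (List String)),
      extractAltLoop xs (some b) acc = acc ++ segB xs b := by
  induction xs with
  | nil => intro b acc; simp [extractAltLoop, segB]
  | cons x rest ih =>
    intro b acc
    obtain ⟨w, p⟩ := x
    by_cases hp : p = "np"
    · simp only [extractAltLoop, segB, hp]
      by_cases hb : 1 < b.length
      · simp [hb, ih, List.append_assoc]
      · simp [hb, ih]
    · simp [extractAltLoop, segB, hp, ih]

theorem extractAltLoop_none (xs : List (String × String)) :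
    ∀ (acc : List (List String)),
      extractAltLoop xs none acc = acc ++ segN xs := by
  induction xs with
  | nil => intro acc; simp [extractAltLoop, segN]
  | cons x rest ih =>
    intro acc
    obtain ⟨w, p⟩ := x
    by_cases hp : p = "np"
    · simp [extractAltLoop, segN, hp, extractAltLoop_some]
    · simp [extractAltLoop, segN, hp, ih]

-- the buffer at offset k with last 'np' at i is the slice W[i:k]; the next 'np' closes it
theorem segB_key (W : List String) :
    ∀ (ps : List String) (k i : Nat), i < k → k ≤ W.length → ps.length = W.length - k →
      segB ((W.drop k).zip ps) ((W.drop i).take (k - i)) = pairsP W (i :: genIdx ps k) := by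
  intro ps
  induction ps with
  | nil =>
    intro k i hik hk hlen
    have : (W.drop k).length = W.length - k := List.length_drop
    simp [genIdx, pairsP, List.zip_nil_right, segB]
  | cons p ps' ih =>
    intro k i hik hk hlen
    have hklt : k < W.length := by
      simp at hlen; omega
    have hdropk : W.drop k = W[k] :: W.drop (k + 1) := List.drop_eq_getElem_cons hklt
    have hblen : ((W.drop i).take (k - i)).length = k - i := by
      have : (W.drop i).length = W.length - i := List.length_drop
      simp [this]; omega
    have hbext : (W.drop i).take (k - i) ++ [W[k]] = (W.drop i).take (k + 1 - i) := by
      have hki : k + 1 - i = (k - i) + 1 := by omega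
      rw [hki, List.take_add_one]
      have hget : (W.drop i)[k - i]? = some W[k] := by
        rw [List.getElem?_drop]
        have : i + (k - i) = k := by omega
        rw [this]
        exact List.getElem?_eq_getElem hklt
      simp [hget]
    have hlen' : ps'.length = W.length - (k + 1) := by simp at hlen ⊢; omega
    have hsingle : (W.drop k).take 1 = [W[k]] := by rw [hdropk]; rfl
    by_cases hp : p = "np"
    · rw [hdropk]
      simp only [List.zip_cons_cons, segB, hp, if_true]
      have ih' := ih (k + 1) k (by omega) (by omega) hlen'
      have hkk : k + 1 - k = 1 := by omega
      rw [hkk, hsingle] at ih'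
      rw [ih']
      have hgen : genIdx ("np" :: ps') k = k :: genIdx ps' (k + 1) := by simp [genIdx]
      rw [hgen]
      have hP : pairsP W (i :: k :: genIdx ps' (k + 1)) =
          (if k > i + 1 then [PySem.List.slice W (some (i : Int)) (some ((k : Int) + 1))] else []) ++ pairsP W (k :: genIdx ps' (k + 1)) := by
        simp only [pairsP, List.tail_cons, List.zip_cons_cons, List.filterMap_cons]
        by_cases hik2 : k > i + 1
        · simp [hik2]
        · simp [hik2]
      rw [hP]
      by_cases hik2 : k > i + 1
      · have hcond : 1 < ((W.drop i).take (k - i)).length := by rw [hblen]; omega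
        have hslice : PySem.List.slice W (some (i : Int)) (some ((k : Int) + 1)) =
            (W.drop i).take (k + 1 - i) := by
          have hc : (k : Int) + 1 = ((k + 1 : Nat) : Int) := by push_cast; ring
          rw [hc, PySem.List.slice_natCast]
        rw [if_pos hcond, if_pos hik2, hslice, ← hbext]
      · have hcond : ¬ 1 < ((W.drop i).take (k - i)).length := by rw [hblen]; omega
        rw [if_neg hcond, if_neg hik2]
    · rw [hdropk]
      simp only [List.zip_cons_cons, segB, hp]
      rw [hbext, ih (k + 1) i (by omega) (by omega) hlen']
      simp [genIdx, hp]

theorem segN_key (W : List String) :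
    ∀ (ps : List String) (k : Nat), k ≤ W.length → ps.length = W.length - k →
      segN ((W.drop k).zip ps) = pairsP W (genIdx ps k) := by
  intro ps
  induction ps with
  | nil =>
    intro k hk hlen
    simp [genIdx, pairsP, List.zip_nil_right, segN]
  | cons p ps' ih =>
    intro k hk hlen
    have hklt : k < W.length := by simp at hlen; omega
    have hdropk : W.drop k = W[k] :: W.drop (k + 1) := List.drop_eq_getElem_cons hklt
    have hlen' : ps'.length = W.length - (k + 1) := by simp at hlen ⊢; omega
    by_cases hp : p = "np"
    · rw [hdropk]
      simp only [List.zip_cons_cons, segN, hp]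
      have hsingle : (W.drop k).take 1 = [W[k]] := by rw [hdropk]; rfl
      have hs := segB_key W ps' (k + 1) k (by omega) (by omega) hlen'
      have hkk : k + 1 - k = 1 := by omega
      rw [hkk, hsingle] at hs
      rw [hs]
      simp [genIdx]
    · rw [hdropk]
      simp only [List.zip_cons_cons, segN, if_neg hp]
      rw [ih (k + 1) (by omega) hlen']
      simp [genIdx, hp]

theorem extract_py_alt_char (words poss : List String) (hlen : words.length = poss.length) :
    extract_py_alt words poss = pairsP words (genIdx poss 0) := by
  unfold extract_py_alt
  rw [extractAltLoop_none]
  have h0 : words.zip poss = (words.drop 0).zip poss := by simp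
  rw [h0, segN_key words poss 0 (by omega) (by omega)]
  simp

-- ===== VERDICT (by name: the statement is the Claim_ definition above) =====
theorem extract_py_spec : Claim_equal_extract_py := by
  intro words poss _ hpre
  unfold Spec_extract_py
  rw [extract_py_char, extract_py_alt_char words poss hpre]
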